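-- pv_equiv track=rewrite | github.com/tn3w/is-crawler | is_crawler/detection.py | _semicolon_agent
-- ===== SOURCE A (Python) =====
-- def _semicolon_agent(low: str) -> bool:
--     i = 0
--     while (i := low.find(";", i)) != -1:
--         j = i + 1
--         while j < len(low) and low[j] == " ":
--             j += 1
--
--         k = j
--         while k < len(low) and (low[k].isalnum() or low[k] == "-"):
--             k += 1
--
--         if low[j:k].endswith("-agent") and k < len(low) and low[k] in ");":
--             return True
--         i += 1
--     return False
-- ===== SOURCE B (Python) =====
-- def _anchor_ok(low: str, p: int) -> bool:
--     e = p + 6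
--     if not (e < len(low) and low[e] in ");"):
--         return False
--     s = p
--     while s > 0 and (low[s - 1].isalnum() or low[s - 1] == "-"):
--         s -= 1
--     u = s
--     while u > 0 and low[u - 1] == " ":
--         u -= 1
--     return u > 0 and low[u - 1] == ";"
--
--
-- def _semicolon_agent(low: str) -> bool:
--     pos = 0
--     while (p := low.find("-agent", pos)) != -1:
--         if _anchor_ok(low, p):
--             return True
--         pos = p + 1
--     return False
-- ===== Notes on version B (the rewrite author's own statement) =====
-- stated objective: alternative
-- what changed: A scans forward from every ';' (skip spaces, then a word run, then test the suffix and terminator); B instead iterates over the rare '-agent' occurrences via find and verifies each anchor's right terminator and its backward left context (word run, then spaces, then ';').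
import Mathlib
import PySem

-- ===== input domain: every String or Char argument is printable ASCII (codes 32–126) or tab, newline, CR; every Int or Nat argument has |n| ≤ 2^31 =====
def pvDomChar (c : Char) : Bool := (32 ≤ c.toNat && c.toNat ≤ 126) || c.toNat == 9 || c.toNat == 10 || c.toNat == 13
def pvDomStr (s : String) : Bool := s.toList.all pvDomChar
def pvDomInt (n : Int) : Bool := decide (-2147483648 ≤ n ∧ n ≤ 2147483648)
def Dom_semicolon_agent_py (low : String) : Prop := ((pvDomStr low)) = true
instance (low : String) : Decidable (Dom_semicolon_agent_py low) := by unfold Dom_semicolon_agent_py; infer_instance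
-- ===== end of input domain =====

-- B replaces A's forward scan from every ';' (skip spaces, then a word run) by a scan over
-- the "-agent" anchors, checking each anchor's right terminator and backward left context;
-- objective: alternative decomposition, same exact return value.

-- shared literal "-agent" and the word-character test 'c.isalnum() or c == "-"'
def pvPat : List Char := ['-', 'a', 'g', 'e', 'n', 't']
def pvWord (c : Char) : Bool := PySem.Chars.isalnum c || c == '-'

-- cited by both loops' 'decreasing_by': a found occurrence of a nonempty pattern lies in [k, length)
theorem pvFindFrom_bounds (l sub : List Char) (k : Nat) (hs : sub ≠ [])
    (h : PySem.Chars.findFrom l sub (k : Int) none ≠ -1) :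
    k ≤ (PySem.Chars.findFrom l sub (k : Int) none).toNat ∧
      (PySem.Chars.findFrom l sub (k : Int) none).toNat < l.length := by
  by_cases hk : k ≤ l.length
  · obtain ⟨h1, h2, -⟩ := PySem.Chars.findFrom_natCast_spec l sub k hk h
    have hk' : (k : Int) ≤ (PySem.Chars.findFrom l sub (k : Int) none) := h1
    have h0 : 0 ≤ PySem.Chars.findFrom l sub (k : Int) none := le_trans (by positivity) hk'
    refine ⟨by omega, ?_⟩
    by_contra hlen
    have : List.drop (PySem.Chars.findFrom l sub (k : Int) none).toNat l = [] :=
      List.drop_eq_nil_of_le (by omega)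
    rw [this] at h2
    exact hs (List.prefix_nil.mp h2)
  · exfalso
    apply h
    simp only [PySem.Chars.findFrom]
    have : ((l.length : Int)) < (k : Int) := by exact_mod_cast Nat.lt_of_not_le hk
    split_ifs with h1 h2 <;> omega

-- ===== PORT A =====
-- 'while j < len(low) and p(low[j]): j += 1' (the two inner skip loops of A)
def pvSkip (p : Char → Bool) (l : List Char) (j : Nat) : Nat :=
  if h : j < l.length ∧ p (l.getD j ' ') = true then pvSkip p l (j + 1) else j
termination_by l.length - j
decreasing_by omega

-- the body of A's outer loop at a found ';' index i
def pvCheckA (l : List Char) (i : Nat) : Bool :=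
  let j := pvSkip (fun c => c == ' ') l (i + 1)
  let k := pvSkip pvWord l j
  PySem.Chars.endswith (PySem.Chars.slice l (some (j : Int)) (some (k : Int))) pvPat
    && decide (k < l.length) && (l.getD k ' ' == ')' || l.getD k ' ' == ';')

-- A's outer loop: i = low.find(";", i); body; i += 1
def pvALoop (l : List Char) (i : Nat) : Bool :=
  let f := PySem.Chars.findFrom l [';'] (i : Int) none
  if hf : f = -1 then false
  else if pvCheckA l f.toNat then true
  else pvALoop l (f.toNat + 1)
termination_by l.length + 1 - i
decreasing_by
  have := pvFindFrom_bounds l [';'] i (by simp) hf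
  omega

def semicolon_agent_py (low : String) : Bool := pvALoop low.toList 0

-- ===== PORT B =====
-- 'while s > 0 and p(low[s-1]): s -= 1' (the two backward walks of B)
def pvBack (p : Char → Bool) (l : List Char) (s : Nat) : Nat :=
  if h : 0 < s ∧ p (l.getD (s - 1) ' ') = true then pvBack p l (s - 1) else s
termination_by s

-- B's _anchor_ok: right terminator, then backward word walk, backward space walk, ';'
def pvAnchorOk (l : List Char) (q : Nat) : Bool :=
  if decide (q + 6 < l.length) && (l.getD (q + 6) ' ' == ')' || l.getD (q + 6) ' ' == ';') then
    let s := pvBack pvWord l q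
    let u := pvBack (fun c => c == ' ') l s
    decide (0 < u) && (l.getD (u - 1) ' ' == ';')
  else false

-- B's outer loop: p = low.find("-agent", pos); if _anchor_ok: return True; pos = p + 1
def pvBLoop (l : List Char) (pos : Nat) : Bool :=
  let f := PySem.Chars.findFrom l pvPat (pos : Int) none
  if hf : f = -1 then false
  else if pvAnchorOk l f.toNat then true
  else pvBLoop l (f.toNat + 1)
termination_by l.length + 1 - pos
decreasing_by
  have := pvFindFrom_bounds l pvPat pos (by simp [pvPat]) hf
  omega

def semicolon_agent_py_alt (low : String) : Bool := pvBLoop low.toList 0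

-- ===== PRECONDITION & SPEC =====
def Spec_semicolon_agent_py (low : String) (out : Bool) : Prop := out = semicolon_agent_py_alt low
instance (low : String) (out : Bool) : Decidable (Spec_semicolon_agent_py low out) := by unfold Spec_semicolon_agent_py; infer_instance

-- ===== CLAIM (what is proved, stated in full; the proofs are below) =====
def Claim_equal_semicolon_agent_py : Prop := ∀ (low : String), Dom_semicolon_agent_py low → Spec_semicolon_agent_py low (semicolon_agent_py low)

-- ===== LEMMAS AND PROOFS =====

-- a ';' sits at index t
def pvSemiAt (l : List Char) (t : Nat) : Prop := t < l.length ∧ l.getD t ' ' = ';'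

-- the pattern "-agent" occupies [q, q+6)
def pvPatAt (l : List Char) (q : Nat) : Prop := q + 6 ≤ l.length ∧ (l.drop q).take 6 = pvPat

-- the common characterisation both programs decide: "-agent" at q terminated by ')' or ';',
-- preceded (over word chars, then spaces) by a ';'
def pvGood (l : List Char) (q : Nat) : Prop :=
  pvPatAt l q ∧ q + 6 < l.length ∧ (l.getD (q + 6) ' ' = ')' ∨ l.getD (q + 6) ' ' = ';') ∧
  ∃ s t, s ≤ q ∧ t < s ∧ l.getD t ' ' = ';' ∧
    (∀ i, s ≤ i → i < q → pvWord (l.getD i ' ') = true) ∧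
    (∀ i, t < i → i < s → l.getD i ' ' = ' ')

theorem pvSingleton_prefix (l : List Char) (a : Char) : ([a] <+: l) ↔ l[0]? = some a := by
  cases l <;> simp [List.cons_prefix_cons, eq_comm]

theorem pvSemiAt_iff (l : List Char) (t : Nat) : pvSemiAt l t ↔ [';'] <+: l.drop t := by
  rw [pvSingleton_prefix, List.getElem?_drop, pvSemiAt]
  constructor
  · rintro ⟨h1, h2⟩
    rw [List.getD_eq_getElem?_getD] at h2
    rw [List.getElem?_eq_getElem (by omega)] at h2 ⊢
    simpa using h2
  · intro h
    have h1 : t < l.length := by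
      by_contra hc
      rw [List.getElem?_eq_none (by omega)] at h
      simp at h
    refine ⟨h1, ?_⟩
    rw [List.getD_eq_getElem?_getD, Nat.add_zero t] at *
    rw [h]
    rfl

theorem pvPatAt_iff (l : List Char) (q : Nat) : pvPatAt l q ↔ pvPat <+: l.drop q := by
  rw [List.prefix_iff_eq_take, pvPatAt]
  constructor
  · rintro ⟨-, h⟩; exact h.symm
  · intro h
    have hl : 6 ≤ l.length - q := by
      have h2 := congrArg List.length h
      simp [pvPat] at h2
      omega
    exact ⟨by omega, h.symm⟩

theorem pvPatAt_getD (l : List Char) (q : Nat) (h : pvPatAt l q) :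
    ∀ i, i < 6 → l.getD (q + i) ' ' = pvPat.getD i ' ' := by
  intro i hi
  obtain ⟨hlen, hp⟩ := h
  have h2 := congrArg (fun xs => xs[i]?) hp
  simp only [List.getElem?_take, hi, if_pos, List.getElem?_drop] at h2
  rw [List.getD_eq_getElem?_getD, List.getD_eq_getElem?_getD, h2]

-- pvSkip: result bounds, skipped chars satisfy p, stopping condition, determinism
theorem pvSkip_le (p : Char → Bool) (l : List Char) (j : Nat) :
    j ≤ pvSkip p l j ∧ (j ≤ l.length → pvSkip p l j ≤ l.length) := by
  fun_induction pvSkip p l j with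
  | case1 j h ih => exact ⟨by omega, fun _ => ih.2 (by omega)⟩
  | case2 j h => omega

theorem pvSkip_sat (p : Char → Bool) (l : List Char) (j : Nat) :
    ∀ i, j ≤ i → i < pvSkip p l j → p (l.getD i ' ') = true := by
  fun_induction pvSkip p l j with
  | case1 j h ih =>
    intro i hji hi
    rcases Nat.eq_or_lt_of_le hji with rfl | hlt
    · exact h.2
    · exact ih i (by omega) hi
  | case2 j h => intro i h1 h2; omega

theorem pvSkip_eq (p : Char → Bool) (l : List Char) {j r : Nat} (hjr : j ≤ r) (hr : r ≤ l.length)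
    (hsat : ∀ i, j ≤ i → i < r → p (l.getD i ' ') = true)
    (hstop : l.length ≤ r ∨ p (l.getD r ' ') = false) : pvSkip p l j = r := by
  fun_induction pvSkip p l j with
  | case1 j h ih =>
    apply ih
    · rcases Nat.eq_or_lt_of_le hjr with rfl | hlt
      · rcases hstop with hs | hs
        · omega
        · rw [h.2] at hs; exact absurd hs (by simp)
      · omega
    · intro i h1 h2; exact hsat i (by omega) h2
  | case2 j h =>
    rcases Nat.eq_or_lt_of_le hjr with rfl | hlt
    · rfl
    · exact absurd ⟨by omega, hsat j (le_refl j) hlt⟩ h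

-- pvBack: result bounds, walked-over chars satisfy p, determinism
theorem pvBack_le (p : Char → Bool) (l : List Char) (s : Nat) : pvBack p l s ≤ s := by
  fun_induction pvBack p l s with
  | case1 s h ih => omega
  | case2 s h => omega

theorem pvBack_sat (p : Char → Bool) (l : List Char) (s : Nat) :
    ∀ i, pvBack p l s ≤ i → i < s → p (l.getD i ' ') = true := by
  fun_induction pvBack p l s with
  | case1 s h ih =>
    intro i h1 h2
    rcases Nat.eq_or_lt_of_le (Nat.le_sub_one_of_lt h2) with he | hlt
    · rw [← he] at h; exact h.2
    · exact ih i h1 (by omega)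
  | case2 s h => intro i h1 h2; omega

theorem pvBack_eq (p : Char → Bool) (l : List Char) {u s : Nat} (hus : u ≤ s)
    (hsat : ∀ i, u ≤ i → i < s → p (l.getD i ' ') = true)
    (hstop : u = 0 ∨ p (l.getD (u - 1) ' ') = false) : pvBack p l s = u := by
  fun_induction pvBack p l s with
  | case1 s h ih =>
    apply ih
    · rcases Nat.eq_or_lt_of_le hus with rfl | hlt
      · rcases hstop with hs | hs
        · omega
        · rw [h.2] at hs; exact absurd hs (by simp)
      · omega
    · intro i h1 h2; exact hsat i h1 (by omega)
  | case2 s h =>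
    rcases Nat.eq_or_lt_of_le hus with rfl | hlt
    · rfl
    · exact absurd ⟨by omega, hsat (s - 1) (by omega) (by omega)⟩ h

theorem pvWordNotSpace (c : Char) (h : pvWord c = true) : (c == ' ') = false := by
  by_contra hc
  rw [show c = ' ' from beq_iff_eq.mp (Bool.of_not_eq_false hc)] at h
  exact absurd h (by decide)

theorem pvPatWord : ∀ m, m < 6 → pvWord (pvPat.getD m ' ') = true := by decide

theorem pvCheckA_good (l : List Char) (t : Nat) (ht : pvSemiAt l t)
    (hc : pvCheckA l t = true) : ∃ q, pvGood l q := by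
  obtain ⟨htl, hts⟩ := ht
  unfold pvCheckA at hc
  simp only [Bool.and_eq_true, decide_eq_true_eq, Bool.or_eq_true, beq_iff_eq,
    PySem.Chars.slice_eq_listSlice, PySem.List.slice_natCast] at hc
  obtain ⟨⟨hend, hklen⟩, hterm⟩ := hc
  have hjle := pvSkip_le (fun c => c == ' ') l (t + 1)
  have hkle := pvSkip_le pvWord l (pvSkip (fun c => c == ' ') l (t + 1))
  set j := pvSkip (fun c => c == ' ') l (t + 1) with hj
  set k := pvSkip pvWord l j with hk
  have hjlen : j ≤ l.length := hjle.2 (by omega)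
  have hklen' : k ≤ l.length := hkle.2 hjlen
  rw [PySem.Chars.endswith_iff] at hend
  have hseglen : (List.take (k - j) (List.drop j l)).length = k - j := by
    simp; omega
  have h6 : 6 ≤ k - j := by
    have hle := hend.length_le
    rw [hseglen] at hle
    simpa [pvPat] using hle
  have hpatf := List.suffix_iff_eq_drop.mp hend
  rw [hseglen] at hpatf
  have hplen : pvPat.length = 6 := by simp [pvPat]
  rw [hplen, List.drop_take, List.drop_drop] at hpatf
  have e1 : k - j - (k - j - 6) = 6 := by omega
  have e2 : j + (k - j - 6) = k - 6 := by omega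
  rw [e1, e2] at hpatf
  have hpa : pvPatAt l (k - 6) := ⟨by omega, hpatf.symm⟩
  refine ⟨k - 6, hpa, by omega, ?_, j, t, by omega, by omega, hts, ?_, ?_⟩
  · have e3 : k - 6 + 6 = k := by omega
    rw [e3]; exact hterm
  · intro i h1 h2
    exact pvSkip_sat pvWord l j i h1 (by omega)
  · intro i h1 h2
    have := pvSkip_sat (fun c => c == ' ') l (t + 1) i (by omega) (by omega)
    simpa using this

theorem pvGood_checkA (l : List Char) (q : Nat) (h : pvGood l q) :
    ∃ t, pvSemiAt l t ∧ pvCheckA l t = true := by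
  obtain ⟨hpa, hq6, hterm, s, t, hsq, hts, htsemi, hword, hspace⟩ := h
  have hgd := pvPatAt_getD l q hpa
  refine ⟨t, ⟨by omega, htsemi⟩, ?_⟩
  have hwordq : ∀ i, s ≤ i → i < q + 6 → pvWord (l.getD i ' ') = true := by
    intro i h1 h2
    by_cases hiq : i < q
    · exact hword i h1 hiq
    · have : l.getD i ' ' = pvPat.getD (i - q) ' ' := by
        have := hgd (i - q) (by omega)
        rwa [show q + (i - q) = i by omega] at this
      rw [this]
      have h16 : i - q < 6 := by omega
      revert h16
      exact fun h16 => pvPatWord (i - q) h16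
  have hjs : pvSkip (fun c => c == ' ') l (t + 1) = s := by
    apply pvSkip_eq _ l (by omega) (by omega)
    · intro i h1 h2
      simp only [beq_iff_eq]
      exact hspace i (by omega) h2
    · right
      exact pvWordNotSpace _ (hwordq s (le_refl s) (by omega))
  have hks : pvSkip pvWord l s = q + 6 := by
    apply pvSkip_eq _ l (by omega) (by omega)
    · intro i h1 h2; exact hwordq i h1 h2
    · right
      rcases hterm with hc | hc <;> rw [hc] <;> decide
  simp only [pvCheckA]
  rw [hjs, hks]
  simp only [Bool.and_eq_true, decide_eq_true_eq, Bool.or_eq_true, beq_iff_eq,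
    PySem.Chars.slice_eq_listSlice, PySem.List.slice_natCast]
  refine ⟨⟨?_, by omega⟩, hterm⟩
  rw [PySem.Chars.endswith_iff, List.suffix_iff_eq_drop]
  have hseglen : (List.take (q + 6 - s) (List.drop s l)).length = q + 6 - s := by
    simp; omega
  have hplen : pvPat.length = 6 := by simp [pvPat]
  rw [hseglen, hplen, List.drop_take, List.drop_drop]
  have e1 : q + 6 - s - (q + 6 - s - 6) = 6 := by omega
  have e2 : s + (q + 6 - s - 6) = q := by omega
  rw [e1, e2]
  exact hpa.2.symm

theorem pvAnchorOk_good (l : List Char) (q : Nat) (hp : pvPatAt l q)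
    (hc : pvAnchorOk l q = true) : pvGood l q := by
  simp only [pvAnchorOk] at hc
  split_ifs at hc with hcond
  simp only [Bool.and_eq_true, decide_eq_true_eq, Bool.or_eq_true, beq_iff_eq] at hcond hc
  obtain ⟨hlen, hterm⟩ := hcond
  obtain ⟨hu0, husemi⟩ := hc
  refine ⟨hp, hlen, hterm,
    pvBack pvWord l q, pvBack (fun c => c == ' ') l (pvBack pvWord l q) - 1,
    pvBack_le pvWord l q, ?_, husemi, ?_, ?_⟩
  · have := pvBack_le (fun c => c == ' ') l (pvBack pvWord l q)
    omega
  · intro i h1 h2; exact pvBack_sat pvWord l q i h1 h2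
  · intro i h1 h2
    have := pvBack_sat (fun c => c == ' ') l (pvBack pvWord l q) i (by omega) h2
    simpa only [beq_iff_eq] using this

theorem pvGood_anchorOk (l : List Char) (q : Nat) (h : pvGood l q) :
    pvPatAt l q ∧ pvAnchorOk l q = true := by
  obtain ⟨hpa, hq6, hterm, s, t, hsq, hts, htsemi, hword, hspace⟩ := h
  refine ⟨hpa, ?_⟩
  have hs : pvBack pvWord l q = s := by
    apply pvBack_eq pvWord l hsq hword
    right
    rcases Nat.eq_or_lt_of_le (Nat.succ_le_of_lt hts) with he | hlt
    · rw [show s - 1 = t by omega, htsemi]; decide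
    · rw [hspace (s - 1) (by omega) (by omega)]; decide
  have hu : pvBack (fun c => c == ' ') l s = t + 1 := by
    apply pvBack_eq _ l (by omega)
    · intro i h1 h2
      simp only [beq_iff_eq]
      exact hspace i (by omega) h2
    · right
      rw [show t + 1 - 1 = t by omega, htsemi]
      decide
  simp only [pvAnchorOk, hs, hu]
  rw [if_pos]
  · simp only [Bool.and_eq_true, decide_eq_true_eq, beq_iff_eq]
    exact ⟨by omega, by rw [show t + 1 - 1 = t by omega]; exact htsemi⟩
  · simp only [Bool.and_eq_true, decide_eq_true_eq, Bool.or_eq_true, beq_iff_eq]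
    exact ⟨hq6, hterm⟩

-- a found-at-(-1) search from k ≤ length contradicts an occurrence at t ≥ k
theorem pvNoOcc (l sub : List Char) (k t : Nat) (hk : k ≤ l.length) (hkt : k ≤ t)
    (hocc : sub <+: l.drop t)
    (hf : PySem.Chars.findFrom l sub (k : Int) none = -1) : False := by
  have hn := PySem.Chars.findFrom_natCast l sub k hk
  rw [hf] at hn
  have hfind : PySem.Chars.find (l.drop k) sub = -1 := by
    by_contra hc
    have h0 := PySem.Chars.neg_one_le_find (l.drop k) sub
    rw [if_neg hc] at hn
    omega
  rw [PySem.Chars.find_eq_neg_one_iff] at hfind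
  apply hfind
  rw [← PySem.Chars.isIn_iff_infix, ← PySem.Chars.exists_prefix_drop_iff_isIn]
  exact ⟨t - k, by rwa [List.drop_drop, show k + (t - k) = t by omega]⟩

theorem pvALoop_iff (l : List Char) (i : Nat) :
    pvALoop l i = true ↔ ∃ t, i ≤ t ∧ pvSemiAt l t ∧ pvCheckA l t = true := by
  fun_induction pvALoop l i with
  | case1 i f hf =>
    constructor
    · intro h; exact absurd h (by simp)
    · rintro ⟨t, hit, hsemi, -⟩
      exfalso
      by_cases hk : i ≤ l.length
      · exact pvNoOcc l [';'] i t hk hit ((pvSemiAt_iff l t).mp hsemi) hf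
      · exact absurd hsemi.1 (by omega)
  | case2 i f hf hcA =>
    have hb := pvFindFrom_bounds l [';'] i (by simp) hf
    have hsp := PySem.Chars.findFrom_natCast_spec l [';'] i (by omega) hf
    simp only [true_iff]
    exact ⟨(PySem.Chars.findFrom l [';'] (i : Int) none).toNat, hb.1,
      (pvSemiAt_iff l _).mpr hsp.2.1, hcA⟩
  | case3 i f hf hcA ih =>
    rw [ih]
    have hb := pvFindFrom_bounds l [';'] i (by simp) hf
    have hsp := PySem.Chars.findFrom_natCast_spec l [';'] i (by omega) hf
    constructor
    · rintro ⟨t, h1, h2, h3⟩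
      exact ⟨t, by omega, h2, h3⟩
    · rintro ⟨t, hit, hsemi, hca⟩
      refine ⟨t, ?_, hsemi, hca⟩
      rcases Nat.lt_or_ge t ((PySem.Chars.findFrom l [';'] (i : Int) none).toNat + 1) with hlt | hge
      · rcases Nat.lt_or_ge t (PySem.Chars.findFrom l [';'] (i : Int) none).toNat with h' | h'
        · exact absurd ((pvSemiAt_iff l t).mp hsemi) (hsp.2.2 t hit h')
        · have : t = (PySem.Chars.findFrom l [';'] (i : Int) none).toNat := by omega
          rw [this] at hca
          exact absurd hca hcA
      · exact hge

theorem pvBLoop_iff (l : List Char) (pos : Nat) :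
    pvBLoop l pos = true ↔ ∃ q, pos ≤ q ∧ pvPatAt l q ∧ pvAnchorOk l q = true := by
  fun_induction pvBLoop l pos with
  | case1 pos f hf =>
    constructor
    · intro h; exact absurd h (by simp)
    · rintro ⟨q, hiq, hpat, -⟩
      exfalso
      by_cases hk : pos ≤ l.length
      · exact pvNoOcc l pvPat pos q hk hiq ((pvPatAt_iff l q).mp hpat) hf
      · exact absurd hpat.1 (by omega)
  | case2 pos f hf hcB =>
    have hb := pvFindFrom_bounds l pvPat pos (by simp [pvPat]) hf
    have hsp := PySem.Chars.findFrom_natCast_spec l pvPat pos (by omega) hf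
    simp only [true_iff]
    exact ⟨(PySem.Chars.findFrom l pvPat (pos : Int) none).toNat, hb.1,
      (pvPatAt_iff l _).mpr hsp.2.1, hcB⟩
  | case3 pos f hf hcB ih =>
    rw [ih]
    have hb := pvFindFrom_bounds l pvPat pos (by simp [pvPat]) hf
    have hsp := PySem.Chars.findFrom_natCast_spec l pvPat pos (by omega) hf
    constructor
    · rintro ⟨q, h1, h2, h3⟩
      exact ⟨q, by omega, h2, h3⟩
    · rintro ⟨q, hiq, hpat, hcb⟩
      refine ⟨q, ?_, hpat, hcb⟩
      rcases Nat.lt_or_ge q ((PySem.Chars.findFrom l pvPat (pos : Int) none).toNat + 1) with hlt | hge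
      · rcases Nat.lt_or_ge q (PySem.Chars.findFrom l pvPat (pos : Int) none).toNat with h' | h'
        · exact absurd ((pvPatAt_iff l q).mp hpat) (hsp.2.2 q hiq h')
        · have : q = (PySem.Chars.findFrom l pvPat (pos : Int) none).toNat := by omega
          rw [this] at hcb
          exact absurd hcb hcB
      · exact hge

-- ===== VERDICT (by name: the statement is the Claim_ definition above) =====
theorem semicolon_agent_py_spec : Claim_equal_semicolon_agent_py := by
  intro low _
  unfold Spec_semicolon_agent_py semicolon_agent_py semicolon_agent_py_alt
  rw [Bool.eq_iff_iff, pvALoop_iff, pvBLoop_iff]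
  constructor
  · rintro ⟨t, -, ht, hc⟩
    obtain ⟨q, hq⟩ := pvCheckA_good _ t ht hc
    exact ⟨q, Nat.zero_le _, (pvGood_anchorOk _ q hq).1, (pvGood_anchorOk _ q hq).2⟩
  · rintro ⟨q, -, hp, hc⟩
    obtain ⟨t, ht, hca⟩ := pvGood_checkA _ q (pvAnchorOk_good _ q hp hc)
    exact ⟨t, Nat.zero_le _, ht, hca⟩
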